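-- pv_equiv track=rewrite | github.com/somekindofpast/py-bites-regular-bites | string/unix_file_permissions.py | get_octal_from_file_permission
-- ===== SOURCE A (Python) =====
-- def get_octal_from_file_permission(rwx: str) -> str:
--     """Receive a Unix file permission and convert it to
--        its octal representation.
--
--        In Unix you have user, group and other permissions,
--        each can have read (r), write (w), and execute (x)
--        permissions expressed by r, w and x.
--
--        Each has a number:
--        r = 4
--        w = 2
--        x = 1
--
--        So this leads to the following input/ outputs examples:
--        rw-r--r-- => 644 (user = 4 + 2, group = 4, other = 4)
--        rwxrwxrwx => 777 (user/group/other all have 4 + 2 + 1)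
--        r-xr-xr-- => 554 (user/group = 4 + 1, other = 4)
--     """
--     res = ""
--     rwx_oct = 0
--     perm_dict = { 'r': 4, 'w': 2, 'x': 1, '-': 0 }
--     for i in range(len(rwx)):
--         rwx_oct += perm_dict[rwx[i]]
--         if (i + 1) % 3 == 0:
--             res += str(rwx_oct)
--             rwx_oct = 0
--     return res
-- ===== SOURCE B (Python) =====
-- def get_octal_from_file_permission(rwx: str) -> str:
--     """Slice the permission string into 3-char groups (user/group/other),
--        score each group as the sum of its characters' values, join the digits."""
--     perm_dict = {'r': 4, 'w': 2, 'x': 1, '-': 0}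
--     groups = len(rwx) // 3
--     return ''.join(str(sum(perm_dict[c] for c in rwx[3 * k:3 * k + 3]))
--                    for k in range(groups))
-- ===== Notes on version B (the rewrite author's own statement) =====
-- stated objective: simpler
-- what changed: B slices the string into 3-char groups with a comprehension, maps each group to the sum of its characters' permission values and joins the digits, instead of A's single index loop threading a running accumulator that is emitted and reset at every third index; Pre_ excludes strings containing a character other than r/w/x/-, on which A raises KeyError.
import Mathlib
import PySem

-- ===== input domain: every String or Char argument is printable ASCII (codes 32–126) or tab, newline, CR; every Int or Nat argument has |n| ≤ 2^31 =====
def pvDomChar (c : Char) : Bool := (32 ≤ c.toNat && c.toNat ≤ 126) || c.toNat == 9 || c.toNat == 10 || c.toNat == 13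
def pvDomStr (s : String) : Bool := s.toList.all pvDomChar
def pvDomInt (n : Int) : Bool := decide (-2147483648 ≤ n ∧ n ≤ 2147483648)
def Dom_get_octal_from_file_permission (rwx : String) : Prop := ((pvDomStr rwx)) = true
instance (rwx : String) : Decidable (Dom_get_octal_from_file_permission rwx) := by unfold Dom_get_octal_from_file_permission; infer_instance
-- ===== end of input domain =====

-- B replaces A's index loop (per-char dict lookup, running accumulator, reset every 3rd index)
-- by slicing into 3-char groups and scoring each group; objective: simpler.
-- ===== PORT A =====
def pvPermDict : PySem.Dict Char Int :=
  PySem.Dict.ofList [('r', 4), ('w', 2), ('x', 1), ('-', 0)]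

-- the for-loop of A as the obvious structural recursion over the same state (res, rwx_oct, i);
-- the dict lookup's `.getD 0` is reached only off Pre_ (where Python raises KeyError)
def pvALoop (cs : List Char) (i : Nat) (res : List Char) (oct : Int) : List Char × Int :=
  match cs with
  | [] => (res, oct)
  | c :: t =>
    let oct' := oct + (pvPermDict.get? c).getD 0
    if (i + 1) % 3 == 0 then pvALoop t (i + 1) (res ++ (PySem.Int.toStr oct').toList) 0
    else pvALoop t (i + 1) res oct'

def get_octal_from_file_permission (rwx : String) : String :=
  String.mk (pvALoop rwx.toList 0 [] 0).1

-- ===== PORT B =====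
def get_octal_from_file_permission_alt (rwx : String) : String :=
  let cs := rwx.toList
  let groups : Int := PySem.Int.floordiv (PySem.Str.len rwx) 3
  let digits := (PySem.List.pyRange 0 groups 1).map
      (fun k => (PySem.Int.toStr
        (((PySem.List.slice cs (some (3 * k)) (some (3 * k + 3))).map
          (fun c => (pvPermDict.get? c).getD 0)).sum)).toList)
  String.mk (digits.flatMap id)

-- ===== PRECONDITION & SPEC =====
-- Pre_ excludes exactly the strings containing a character other than r, w, x or dash, on which A raises KeyError.
def Pre_get_octal_from_file_permission (rwx : String) : Prop :=
  (rwx.toList.all (fun c => c == 'r' || c == 'w' || c == 'x' || c == '-')) = true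
instance (rwx : String) : Decidable (Pre_get_octal_from_file_permission rwx) := by
  unfold Pre_get_octal_from_file_permission; infer_instance

def pvWitness_get_octal_from_file_permission : String := "rw-r--r--"

def Spec_get_octal_from_file_permission (rwx : String) (out : String) : Prop :=
  out = get_octal_from_file_permission_alt rwx
instance (rwx : String) (out : String) : Decidable (Spec_get_octal_from_file_permission rwx out) := by
  unfold Spec_get_octal_from_file_permission; infer_instance

-- ===== CLAIM (what is proved, stated in full; the proofs are below) =====
def Claim_equal_get_octal_from_file_permission : Prop :=
  ∀ (rwx : String), Dom_get_octal_from_file_permission rwx →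
    Pre_get_octal_from_file_permission rwx →
      Spec_get_octal_from_file_permission rwx (get_octal_from_file_permission rwx)

-- ===== LEMMAS AND PROOFS =====

-- the full 3-char chunks of a list
def pvChunks : List Char → List (List Char)
  | a :: b :: c :: t => [a, b, c] :: pvChunks t
  | _ => []

def pvDigitChars (g : List Char) : List Char :=
  (PySem.Int.toStr ((g.map (fun c => (pvPermDict.get? c).getD 0)).sum)).toList

lemma pvDigit_eq (a b c : Char) :
    (0 : Int) + (pvPermDict.get? a).getD 0 + (pvPermDict.get? b).getD 0
        + (pvPermDict.get? c).getD 0 =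
      (([a, b, c].map (fun c => (pvPermDict.get? c).getD 0)).sum) := by
  simp; ring

lemma pvALoop_eq (cs : List Char) (i : Nat) (hi : i % 3 = 0)
    (res : List Char) :
    (pvALoop cs i res 0).1 = res ++ (pvChunks cs).flatMap pvDigitChars := by
  match cs with
  | [] => simp [pvALoop, pvChunks]
  | [a] =>
    have h1 : (i + 1) % 3 ≠ 0 := by omega
    simp [pvALoop, h1, pvChunks]
  | [a, b] =>
    have h1 : (i + 1) % 3 ≠ 0 := by omega
    have h2 : (i + 1 + 1) % 3 ≠ 0 := by omega
    simp [pvALoop, h1, h2, pvChunks]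
  | a :: b :: c :: t =>
    have h1 : (i + 1) % 3 ≠ 0 := by omega
    have h2 : (i + 1 + 1) % 3 ≠ 0 := by omega
    have h3 : (i + 1 + 1 + 1) % 3 = 0 := by omega
    have ih := pvALoop_eq t (i + 1 + 1 + 1) h3
      (res ++ (PySem.Int.toStr ((0 : Int) + (pvPermDict.get? a).getD 0
        + (pvPermDict.get? b).getD 0 + (pvPermDict.get? c).getD 0)).toList)
    simp only [pvALoop, h1, h2, h3, beq_iff_eq, if_true, if_false, beq_self_eq_true]
    rw [ih]
    rw [pvDigit_eq a b c]
    simp [pvChunks, pvDigitChars, List.flatMap_cons]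

lemma pvGroups_eq (cs : List Char) :
    (List.range (cs.length / 3)).map (fun k => (cs.drop (3 * k)).take 3) = pvChunks cs := by
  match cs with
  | [] => simp [pvChunks]
  | [a] => simp [pvChunks]
  | [a, b] => simp [pvChunks]
  | a :: b :: c :: t =>
    have hlen : (a :: b :: c :: t).length / 3 = t.length / 3 + 1 := by
      simp [List.length_cons]; omega
    rw [hlen, List.range_succ_eq_map]
    simp only [List.map_cons, List.map_map]
    have hhead : ((a :: b :: c :: t).drop (3 * 0)).take 3 = [a, b, c] := by simp
    have htail : ∀ k : Nat, ((a :: b :: c :: t).drop (3 * (k + 1))).take 3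
        = (t.drop (3 * k)).take 3 := by
      intro k
      have e : 3 * (k + 1) = 3 * k + 1 + 1 + 1 := by omega
      simp [e, List.drop_succ_cons]
    rw [hhead]
    have : ((List.range (t.length / 3)).map
        ((fun k => ((a :: b :: c :: t).drop (3 * k)).take 3) ∘ Nat.succ))
        = (List.range (t.length / 3)).map (fun k => (t.drop (3 * k)).take 3) := by
      apply List.map_congr_left
      intro k _
      simpa using htail k
    rw [this, pvGroups_eq t]
    simp [pvChunks]

lemma pvAlt_eq (rwx : String) :
    get_octal_from_file_permission_alt rwx
      = String.mk ((pvChunks rwx.toList).flatMap pvDigitChars) := by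
  unfold get_octal_from_file_permission_alt
  dsimp only
  have hlen : PySem.Str.len rwx = (rwx.toList.length : Int) := by
    simp [PySem.Str.len_eq]
  have hdiv : PySem.Int.floordiv (rwx.toList.length : Int) 3
      = ((rwx.toList.length / 3 : Nat) : Int) := by
    exact_mod_cast PySem.Int.floordiv_natCast rwx.toList.length 3
  rw [hlen, hdiv, PySem.List.pyRange_zero_natCast]
  simp only [List.map_map]
  have hmap : ∀ f : List Char → List Char, ((List.range (rwx.toList.length / 3)).map
      ((fun k => f (PySem.List.slice rwx.toList (some (3 * k)) (some (3 * k + 3)))) ∘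
        (fun n : Nat => (n : Int))))
      = (List.range (rwx.toList.length / 3)).map
        (fun k => f ((rwx.toList.drop (3 * k)).take 3)) := by
    intro f
    apply List.map_congr_left
    intro k _
    have h1 : (3 : Int) * (k : Int) = ((3 * k : Nat) : Int) := by push_cast; ring
    have h2 : ((3 * k : Nat) : Int) + 3 = ((3 * k + 3 : Nat) : Int) := by push_cast; ring
    simp only [Function.comp_apply, h1, h2, PySem.List.slice_natCast]
    congr 2
    omega
  rw [hmap (fun g => (PySem.Int.toStr ((g.map (fun c => (pvPermDict.get? c).getD 0)).sum)).toList)]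
  have hcomp : (List.range (rwx.toList.length / 3)).map
        (fun k => (PySem.Int.toStr
          (((rwx.toList.drop (3 * k)).take 3).map (fun c => (pvPermDict.get? c).getD 0)).sum).toList)
      = List.map pvDigitChars
          ((List.range (rwx.toList.length / 3)).map (fun k => (rwx.toList.drop (3 * k)).take 3)) := by
    rw [List.map_map]
    rfl
  rw [hcomp, pvGroups_eq]
  simp [List.flatMap_def]

-- ===== VERDICT (by name: the statement is the Claim_ definition above) =====
theorem get_octal_from_file_permission_spec : Claim_equal_get_octal_from_file_permission := by
  intro rwx _ hpre
  unfold Spec_get_octal_from_file_permission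
  rw [pvAlt_eq]
  unfold get_octal_from_file_permission
  rw [pvALoop_eq rwx.toList 0 rfl []]
  simp
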